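-- pv_equiv track=rewrite | github.com/datablogin/PaidSearchNav-MCP | archive/old_app/paidsearchnav/parsers/csv_parser.py | validate
-- ===== SOURCE A (Python) =====
-- from typing import Any, Callable, Dict, List, Optional, Type, TypeVar, Union
--
-- def validate(data: List[Dict[str, Any]]) -> bool:
--     """Validate the parsed CSV data.
--
--     Args:
--         data: List of dictionaries containing parsed data.
--
--     Returns:
--         True if data is valid, False otherwise.
--     """
--     if not data:
--         return False
--
--     # Check that all rows have the same keys
--     expected_keys = set(data[0].keys())
--     for row in data[1:]:
--         if set(row.keys()) != expected_keys:
--             return False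
--
--     return True
-- ===== SOURCE B (Python) =====
-- def validate(data):
--     """Validate the parsed CSV data: True iff all rows share the same key set."""
--     return len({frozenset(row.keys()) for row in data}) == 1
-- ===== Notes on version B (the rewrite author's own statement) =====
-- stated objective: idiomatic
-- what changed: Replaces A's fix-first-row-then-scan-with-early-exit loop by collecting the set of distinct key-signatures (frozensets) of all rows in one comprehension and returning whether its cardinality is exactly 1; the empty-data case falls out as cardinality 0.
import Mathlib
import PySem

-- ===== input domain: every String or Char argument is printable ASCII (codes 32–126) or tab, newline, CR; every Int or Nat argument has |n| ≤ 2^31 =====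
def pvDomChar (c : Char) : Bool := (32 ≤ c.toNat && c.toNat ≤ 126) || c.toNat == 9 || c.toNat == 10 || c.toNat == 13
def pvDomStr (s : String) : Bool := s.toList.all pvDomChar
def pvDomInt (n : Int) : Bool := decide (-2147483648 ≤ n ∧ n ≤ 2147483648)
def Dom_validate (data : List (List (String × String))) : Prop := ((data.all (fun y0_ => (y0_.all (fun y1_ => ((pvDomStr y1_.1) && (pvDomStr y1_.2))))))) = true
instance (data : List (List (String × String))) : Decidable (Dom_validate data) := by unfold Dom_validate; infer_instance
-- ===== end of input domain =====

-- B replaces A's fix-first-row-and-scan early-exit loop with collecting the set of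
-- distinct key-signatures of all rows and checking its cardinality is exactly 1 (idiomatic).

-- ===== PORT A =====
-- A: if not data: return False; expected = set(data[0].keys()); scan data[1:], early False on mismatch.
def validate (data : List (List (String × String))) : Bool :=
  match data with
  | [] => false
  | first :: rest =>
    let expected := PySem.Set.ofList (first.map Prod.fst)
    rest.all (fun row => PySem.Set.equal (PySem.Set.ofList (row.map Prod.fst)) expected)

-- ===== PORT B =====
-- B: len({frozenset(row.keys()) for row in data}) == 1.  A Python set OF frozensets is
-- ported by hand as a dedup-by-set-equality list of signatures (frozenset equality is
-- PySem.Set.equal, not list equality, so PySem.Set (PySem.Set String) does not apply);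
-- exact: only the cardinality of the collection is consumed.
def validate_alt (data : List (List (String × String))) : Bool :=
  let sigs := data.foldl
    (fun acc row =>
      let s := PySem.Set.ofList (row.map Prod.fst)
      if acc.any (fun t => PySem.Set.equal t s) then acc else acc ++ [s])
    ([] : List (PySem.Set String))
  sigs.length == 1

-- ===== PRECONDITION & SPEC =====
def Spec_validate (data : List (List (String × String))) (out : Bool) : Prop := out = validate_alt data
instance (data : List (List (String × String))) (out : Bool) : Decidable (Spec_validate data out) := by unfold Spec_validate; infer_instance

-- ===== CLAIM (what is proved, stated in full; the proofs are below) =====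
def Claim_equal_validate : Prop := ∀ (data : List (List (String × String))), Dom_validate data → Spec_validate data (validate data)

-- ===== LEMMAS AND PROOFS =====

theorem pvEqualComm (s t : PySem.Set String) : PySem.Set.equal s t = PySem.Set.equal t s := by
  rw [Bool.eq_iff_iff, PySem.Set.equal_iff, PySem.Set.equal_iff]
  constructor <;> intro h x <;> exact (h x).symm

-- the fold's accumulator never shrinks
theorem pvFoldLenGe (l : List (List (String × String))) (acc : List (PySem.Set String)) :
    acc.length ≤ (l.foldl
      (fun acc row =>
        let s := PySem.Set.ofList (row.map Prod.fst)
        if acc.any (fun t => PySem.Set.equal t s) then acc else acc ++ [s]) acc).length := by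
  induction l generalizing acc with
  | nil => simp
  | cons r l ih =>
    simp only [List.foldl]
    split
    · exact ih acc
    · exact le_trans (by simp) (ih _)

-- fold starting from a single signature: length stays 1 iff every later row matches it
theorem pvFoldOne (l : List (List (String × String))) (e : PySem.Set String) :
    ((l.foldl
      (fun acc row =>
        let s := PySem.Set.ofList (row.map Prod.fst)
        if acc.any (fun t => PySem.Set.equal t s) then acc else acc ++ [s]) [e]).length == 1)
      = l.all (fun row => PySem.Set.equal (PySem.Set.ofList (row.map Prod.fst)) e) := by
  induction l with
  | nil => rfl
  | cons r l ih =>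
    simp only [List.foldl, List.all_cons, List.any_cons, List.any_nil, Bool.or_false]
    by_cases h : PySem.Set.equal e (PySem.Set.ofList (r.map Prod.fst)) = true
    · rw [if_pos h, pvEqualComm, h, Bool.true_and, ih]
    · have h' := Bool.eq_false_iff.mpr h
      rw [if_neg h, pvEqualComm, h', Bool.false_and]
      have hlen := pvFoldLenGe l (e :: [PySem.Set.ofList (r.map Prod.fst)])
      simp only [List.length_cons, List.length_nil] at hlen
      simp only [List.cons_append, List.nil_append, beq_eq_false_iff_ne, ne_eq]
      omega

-- ===== VERDICT (by name: the statement is the Claim_ definition above) =====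
theorem validate_spec : Claim_equal_validate := by
  intro data _
  unfold Spec_validate validate validate_alt
  match data with
  | [] => rfl
  | first :: rest =>
    simp only [List.foldl, List.any_nil, Bool.false_eq_true, if_false, List.nil_append]
    exact (pvFoldOne rest (PySem.Set.ofList (first.map Prod.fst))).symm
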